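-- pv_equiv track=rewrite | github.com/Komatsunana0216/MVP-enhanced | MVP-enhanced/evluation_utils.py | split_duplicate_subseq
-- ===== SOURCE A (Python) =====
-- def split_duplicate_subseq(opath_list, max_len):
--     length_list = []
--     subsequence = [opath_list[0]]
--     for i in range(0, len(opath_list) - 1):
--         if opath_list[i] == opath_list[i + 1]:
--             subsequence.append(opath_list[i])
--         else:
--             length_list.append(len(subsequence))
--             subsequence = [opath_list[i]]
--     length_list.append(len(subsequence))
--     return length_list + [0] * (max_len - len(length_list))
-- ===== SOURCE B (Python) =====
-- def split_duplicate_subseq(opath_list, max_len):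
--     n = len(opath_list)
--     boundaries = [0] + [i + 1 for i in range(n - 1)
--                         if opath_list[i] != opath_list[i + 1]] + [n]
--     lengths = [b - a for a, b in zip(boundaries, boundaries[1:])]
--     return lengths + [0] * (max_len - len(lengths))
-- ===== Notes on version B (the rewrite author's own statement) =====
-- stated objective: alternative
-- what changed: A carries a running subsequence list and emits its length at each change; B instead materialises the list of change-point boundary indices and takes successive differences (boundaries-then-differencing decomposition), padding at the end.
-- outside the precondition, e.g. on split_duplicate_subseq([], 3): A raises IndexError, B returns [0, 0, 0]
import Mathlib
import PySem

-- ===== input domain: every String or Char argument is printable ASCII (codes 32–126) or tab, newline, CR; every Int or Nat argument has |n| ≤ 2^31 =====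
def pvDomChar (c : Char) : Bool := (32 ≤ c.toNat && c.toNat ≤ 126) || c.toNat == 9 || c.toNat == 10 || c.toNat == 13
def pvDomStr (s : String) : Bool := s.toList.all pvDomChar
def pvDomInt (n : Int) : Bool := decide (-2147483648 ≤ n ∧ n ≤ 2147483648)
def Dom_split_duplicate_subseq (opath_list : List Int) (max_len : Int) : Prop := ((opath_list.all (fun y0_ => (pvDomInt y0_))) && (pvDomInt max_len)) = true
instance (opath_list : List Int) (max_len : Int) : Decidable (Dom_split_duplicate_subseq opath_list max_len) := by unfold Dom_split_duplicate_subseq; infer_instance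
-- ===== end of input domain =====

-- B replaces A's running-subsequence accumulator by a boundary-index pass (change points) followed by
-- successive differencing (objective: alternative decomposition, same O(n) cost).

-- ===== PORT A =====
def split_duplicate_subseq (opath_list : List Int) (max_len : Int) : List Int :=
  match PySem.List.pyGet? opath_list 0 with
  | none => []  -- opath_list[0] raises IndexError on []; excluded by Pre_
  | some x0 =>
    -- for i in range(0, len(opath_list) - 1): indices are always in range, so pyGetD is exact here
    let st := (PySem.List.pyRange 0 ((opath_list.length : Int) - 1) 1).foldl
      (fun (st : List Int × List Int) i =>
        if PySem.List.pyGetD opath_list i 0 = PySem.List.pyGetD opath_list (i + 1) 0 then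
          (st.1, st.2 ++ [PySem.List.pyGetD opath_list i 0])
        else
          (st.1 ++ [(st.2.length : Int)], [PySem.List.pyGetD opath_list i 0]))
      (([] : List Int), [x0])
    let length_list := st.1 ++ [(st.2.length : Int)]
    length_list ++ List.replicate (max_len - (length_list.length : Int)).toNat 0

-- ===== PORT B =====
def split_duplicate_subseq_alt (opath_list : List Int) (max_len : Int) : List Int :=
  let n := opath_list.length
  -- comprehension over range(n - 1); indices are always in range, so pyGetD is exact here
  let boundaries : List Int :=
    [0] ++ ((List.range (n - 1)).filterMap (fun i =>
      if PySem.List.pyGetD opath_list (i : Int) 0 ≠ PySem.List.pyGetD opath_list ((i : Int) + 1) 0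
      then some ((i : Int) + 1) else none)) ++ [(n : Int)]
  let lengths := (boundaries.zip (PySem.List.slice boundaries (some 1) none)).map (fun p => p.2 - p.1)
  lengths ++ List.replicate (max_len - (lengths.length : Int)).toNat 0

-- ===== PRECONDITION & SPEC =====
-- Pre_ excludes only the empty list, on which A raises IndexError (opath_list[0]).
def Pre_split_duplicate_subseq (opath_list : List Int) (max_len : Int) : Prop := opath_list ≠ []
instance (opath_list : List Int) (max_len : Int) : Decidable (Pre_split_duplicate_subseq opath_list max_len) := by unfold Pre_split_duplicate_subseq; infer_instance
def pvWitness_split_duplicate_subseq : List Int × Int := ([1, 1, 2, 2, 2, 3], 8)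

def Spec_split_duplicate_subseq (opath_list : List Int) (max_len : Int) (out : List Int) : Prop := out = split_duplicate_subseq_alt opath_list max_len
instance (opath_list : List Int) (max_len : Int) (out : List Int) : Decidable (Spec_split_duplicate_subseq opath_list max_len out) := by unfold Spec_split_duplicate_subseq; infer_instance

-- ===== CLAIM (what is proved, stated in full; the proofs are below) =====
def Claim_equal_split_duplicate_subseq : Prop := ∀ (opath_list : List Int) (max_len : Int), Dom_split_duplicate_subseq opath_list max_len → Pre_split_duplicate_subseq opath_list max_len → Spec_split_duplicate_subseq opath_list max_len (split_duplicate_subseq opath_list max_len)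

-- ===== LEMMAS AND PROOFS =====

-- A's loop step on the pair (previous element, current element)
def pvStepA (st : List Int × List Int) (a b : Int) : List Int × List Int :=
  if a = b then (st.1, st.2 ++ [a]) else (st.1 ++ [(st.2.length : Int)], [a])

-- structural form of A's index loop
def pvLoopA (prev : Int) : List Int → (List Int × List Int) → (List Int × List Int)
  | [], st => st
  | y :: ys, st => pvLoopA y ys (pvStepA st prev y)

-- run lengths, structurally
def pvGo (c : Int) (k : Int) : List Int → List Int
  | [] => [k]
  | y :: ys => if y = c then pvGo c (k + 1) ys else k :: pvGo y 1 ys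

-- interior change-point boundaries, structurally, with offset o = index of prev
def pvBnds (prev : Int) : List Int → Int → List Int
  | [], _ => []
  | y :: ys, o => if prev ≠ y then (o + 1) :: pvBnds y ys (o + 1) else pvBnds y ys (o + 1)

-- successive differences with previous value p
def pvDiffs (p : Int) : List Int → List Int
  | [] => []
  | h :: t => (h - p) :: pvDiffs h t

def pvBump : List Int → List Int
  | [] => []
  | h :: t => (h + 1) :: t

theorem pvGetD_cons_succ (a : Int) (t : List Int) (k : Nat) (d : Int) :
    PySem.List.pyGetD (a :: t) ((k : Int) + 1) d = PySem.List.pyGetD t (k : Int) d := by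
  have h : ((k : Int) + 1) = ((k + 1 : Nat) : Int) := by push_cast; ring
  rw [h, PySem.List.pyGetD_natCast, PySem.List.pyGetD_natCast]
  simp [List.getD]

theorem pvLemA (rest : List Int) (x : Int) (st : List Int × List Int) :
    (PySem.List.pyRange 0 (((x :: rest).length : Int) - 1) 1).foldl
      (fun (st : List Int × List Int) i =>
        if PySem.List.pyGetD (x :: rest) i 0 = PySem.List.pyGetD (x :: rest) (i + 1) 0 then
          (st.1, st.2 ++ [PySem.List.pyGetD (x :: rest) i 0])
        else
          (st.1 ++ [(st.2.length : Int)], [PySem.List.pyGetD (x :: rest) i 0])) st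
    = pvLoopA x rest st := by
  induction rest generalizing x st with
  | nil =>
    have h : (((x :: ([] : List Int)).length : Int) - 1) = 0 := by simp
    rw [h, PySem.List.pyRange_one_eq_nil (by omega)]
    rfl
  | cons y ys ih =>
    have hlen : (((x :: y :: ys).length : Int) - 1) = ((ys.length : Int) + 1) := by
      simp
    rw [hlen, PySem.List.pyRange_one_cons (by positivity)]
    simp only [List.foldl_cons]
    have h0 : PySem.List.pyGetD (x :: y :: ys) 0 0 = x := PySem.List.pyGetD_zero_cons x (y :: ys) 0
    have h1 : PySem.List.pyGetD (x :: y :: ys) (0 + 1) 0 = y := by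
      have : ((0 : Int) + 1) = (((0 : Nat) : Int) + 1) := by norm_num
      rw [this, pvGetD_cons_succ]
      simp [PySem.List.pyGetD_zero_cons]
    rw [h0, h1]
    have hshift : ∀ st' : List Int × List Int,
        (PySem.List.pyRange (0 + 1) ((ys.length : Int) + 1) 1).foldl
          (fun (st : List Int × List Int) i =>
            if PySem.List.pyGetD (x :: y :: ys) i 0 = PySem.List.pyGetD (x :: y :: ys) (i + 1) 0 then
              (st.1, st.2 ++ [PySem.List.pyGetD (x :: y :: ys) i 0])
            else
              (st.1 ++ [(st.2.length : Int)], [PySem.List.pyGetD (x :: y :: ys) i 0])) st'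
        = pvLoopA y ys st' := by
      intro st'
      rw [← ih y st']
      have h2 : (((y :: ys).length : Int) - 1) = (ys.length : Int) := by simp
      rw [h2]
      rw [PySem.List.pyRange_one, PySem.List.pyRange_one]
      have h3 : (((ys.length : Int) + 1) - (0 + 1)).toNat = ys.length := by omega
      have h4 : ((ys.length : Int) - 0).toNat = ys.length := by omega
      rw [h3, h4, List.foldl_map, List.foldl_map]
      apply PySem.List.foldl_congr_mem
      intro acc k hk
      have e1 : (0 + 1 + (k : Int)) = ((k : Int) + 1) := by ring
      have e2 : ((0 : Int) + (k : Int)) = (k : Int) := by ring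
      have e3 : ((k : Int) + 1 + 1) = (((k + 1 : Nat) : Int) + 1) := by push_cast; ring
      rw [e1, e2, e3, pvGetD_cons_succ, pvGetD_cons_succ]
      push_cast
      rfl
    rw [hshift]
    rfl

theorem pvLemGoA (rest : List Int) (x : Int) (acc sub : List Int) :
    (pvLoopA x rest (acc, sub)).1 ++ [((pvLoopA x rest (acc, sub)).2.length : Int)]
      = acc ++ pvGo x (sub.length : Int) rest := by
  induction rest generalizing x acc sub with
  | nil => simp [pvLoopA, pvGo]
  | cons y ys ih =>
    by_cases h : x = y
    · have hx : pvGo x (sub.length : Int) (y :: ys) = pvGo y ((sub ++ [x]).length : Int) ys := by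
        simp [pvGo, h]
      rw [hx]
      simpa [pvLoopA, pvStepA, h] using ih y acc (sub ++ [x])
    · simp only [pvLoopA, pvStepA, if_neg h]
      rw [ih y (acc ++ [(sub.length : Int)]) [x]]
      simp [pvGo, Ne.symm h]

theorem pvLemB' (rest : List Int) (x : Int) (o : Int) :
    (List.range rest.length).filterMap (fun (k : Nat) =>
      if PySem.List.pyGetD (x :: rest) ((k : Int)) 0 ≠ PySem.List.pyGetD (x :: rest) ((k : Int) + 1) 0
      then some (o + (k : Int) + 1) else none)
    = pvBnds x rest o := by
  induction rest generalizing x o with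
  | nil => simp [pvBnds]
  | cons y ys ih =>
    rw [show (y :: ys).length = ys.length + 1 from rfl, List.range_succ_eq_map]
    rw [List.filterMap_cons, List.filterMap_map]
    have h0 : PySem.List.pyGetD (x :: y :: ys) (0 : Int) 0 = x := by
      simp [PySem.List.pyGetD_zero_cons]
    have h1 : PySem.List.pyGetD (x :: y :: ys) (1 : Int) 0 = y := by
      rw [show (1 : Int) = (((0 : Nat) : Int) + 1) by norm_num, pvGetD_cons_succ]
      simp [PySem.List.pyGetD_zero_cons]
    have htail : (List.range ys.length).filterMap
        ((fun (k : Nat) =>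
          if PySem.List.pyGetD (x :: y :: ys) ((k : Int)) 0 ≠ PySem.List.pyGetD (x :: y :: ys) ((k : Int) + 1) 0
          then some (o + (k : Int) + 1) else none) ∘ Nat.succ)
        = pvBnds y ys (o + 1) := by
      rw [← ih y (o + 1)]
      apply List.filterMap_congr
      intro k hk
      have e1 : ((k.succ : Nat) : Int) = ((k : Int) + 1) := by push_cast; ring
      have e2 : ((k : Int) + 1) + 1 = ((k + 1 : Nat) : Int) + 1 := by push_cast; ring
      have ha : PySem.List.pyGetD (x :: y :: ys) ((k.succ : Nat) : Int) 0
          = PySem.List.pyGetD (y :: ys) ((k : Int)) 0 := by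
        rw [e1, pvGetD_cons_succ]
      have hb : PySem.List.pyGetD (x :: y :: ys) (((k.succ : Nat) : Int) + 1) 0
          = PySem.List.pyGetD (y :: ys) ((k : Int) + 1) 0 := by
        rw [e1, e2, pvGetD_cons_succ]
        push_cast
        rfl
      have hv : o + ((k.succ : Nat) : Int) + 1 = (o + 1) + (k : Int) + 1 := by push_cast; ring
      simp only [Function.comp_apply, ha, hb, hv]
    rw [htail]
    have hxy0 : PySem.List.pyGetD (x :: y :: ys) (((0 : Nat) : Int)) 0 = x := by simp only [Nat.cast_zero]; exact h0
    have hxy1 : PySem.List.pyGetD (x :: y :: ys) (((0 : Nat) : Int) + 1) 0 = y := by simp only [Nat.cast_zero, zero_add]; exact h1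
    by_cases h : x = y
    · rw [if_neg (fun hc => hc (hxy0.trans (h.trans hxy1.symm)))]
      simp [pvBnds, h]
    · rw [if_pos (fun hEq => h ((hxy0.symm.trans hEq).trans hxy1))]
      simp [pvBnds, h]

theorem pvLemB (rest : List Int) (x : Int) (o : Int) :
    ((List.range rest.length).map (fun (k : Nat) => (k : Int))).filterMap (fun j =>
      if PySem.List.pyGetD (x :: rest) j 0 ≠ PySem.List.pyGetD (x :: rest) (j + 1) 0
      then some (o + j + 1) else none)
    = pvBnds x rest o := by
  rw [List.filterMap_map]
  exact pvLemB' rest x o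

theorem pvLemZip (rest : List Int) (p : Int) :
    (((p :: rest).zip rest).map (fun q => q.2 - q.1)) = pvDiffs p rest := by
  induction rest generalizing p with
  | nil => simp [pvDiffs]
  | cons h t ih => simp [pvDiffs, ih]

theorem pvLemBumpGo (xs : List Int) (c k : Int) : pvGo c (k + 1) xs = pvBump (pvGo c k xs) := by
  induction xs generalizing c k with
  | nil => simp [pvGo, pvBump]
  | cons y ys ih =>
    by_cases h : y = c <;> simp [pvGo, h, pvBump, ih]

theorem pvLemDiffsBump (h : Int) (t : List Int) (o : Int) :
    pvDiffs o (h :: t) = pvBump (pvDiffs (o + 1) (h :: t)) := by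
  simp [pvDiffs, pvBump]; ring

theorem pvLemMain (rest : List Int) (x : Int) (o : Int) :
    pvDiffs o (pvBnds x rest o ++ [o + 1 + (rest.length : Int)]) = pvGo x 1 rest := by
  induction rest generalizing x o with
  | nil => simp [pvBnds, pvDiffs, pvGo]
  | cons y ys ih =>
    have harith : o + 1 + (((y :: ys).length : Int)) = (o + 1) + 1 + (ys.length : Int) := by
      simp; ring
    by_cases h : x = y
    · have hb : pvBnds x (y :: ys) o = pvBnds y ys (o + 1) := by simp [pvBnds, h]
      rw [hb, harith]
      have hne : ∃ hd tl, pvBnds y ys (o + 1) ++ [(o + 1) + 1 + (ys.length : Int)] = hd :: tl := by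
        cases pvBnds y ys (o + 1) <;> exact ⟨_, _, rfl⟩
      obtain ⟨hd, tl, he⟩ := hne
      rw [he]
      rw [pvLemDiffsBump hd tl o, ← he, ih y (o + 1)]
      have : pvGo x 1 (y :: ys) = pvGo y (1 + 1) ys := by simp [pvGo, h]
      rw [this, pvLemBumpGo]
    · have hb : pvBnds x (y :: ys) o = (o + 1) :: pvBnds y ys (o + 1) := by simp [pvBnds, h]
      rw [hb, harith]
      simp only [List.cons_append, pvDiffs]
      rw [ih y (o + 1)]
      simp [pvGo, Ne.symm h]

-- ===== VERDICT (by name: the statement is the Claim_ definition above) =====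
theorem split_duplicate_subseq_spec : Claim_equal_split_duplicate_subseq := by
  intro opath_list max_len hdom hpre
  unfold Spec_split_duplicate_subseq
  cases opath_list with
  | nil => exact absurd rfl hpre
  | cons x rest =>
    simp only [split_duplicate_subseq, split_duplicate_subseq_alt]
    have hget : PySem.List.pyGet? (x :: rest) 0 = some x := by simp [PySem.List.pyGet?, PySem.List.pyIdx?]
    simp only [hget]
    rw [pvLemA rest x (([] : List Int), [x])]
    rw [pvLemGoA rest x [] [x]]
    have hsub : ((([x] : List Int)).length : Int) = 1 := by simp
    rw [hsub]
    simp only [List.nil_append]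
    -- B side
    have hlen1 : (x :: rest).length - 1 = rest.length := by simp
    rw [hlen1]
    have hdo : (do
        let a ← List.range rest.length
        pure ((a : Int))) = (List.range rest.length).map (fun (k : Nat) => (k : Int)) := by
      simp only [List.bind_eq_flatMap]
      induction List.range rest.length with
      | nil => rfl
      | cons h t ih =>
        simp only [List.flatMap_cons, List.map_cons]
        exact congrArg (List.cons _) ih
    rw [hdo]
    have hmid := pvLemB rest x 0
    simp only [zero_add] at hmid
    rw [hmid]
    have hcons : ([(0 : Int)] ++ pvBnds x rest 0 ++ [((x :: rest).length : Int)])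
        = (0 : Int) :: (pvBnds x rest 0 ++ [((x :: rest).length : Int)]) := by
      simp
    rw [hcons]
    rw [PySem.List.slice_from_one]
    rw [show ((0 : Int) :: (pvBnds x rest 0 ++ [((x :: rest).length : Int)])).tail
        = pvBnds x rest 0 ++ [((x :: rest).length : Int)] from rfl]
    rw [pvLemZip (pvBnds x rest 0 ++ [((x :: rest).length : Int)]) 0]
    rw [show (((x :: rest).length : Int)) = 0 + 1 + (rest.length : Int) by simp; omega]
    rw [pvLemMain rest x 0]
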